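-- pv_equiv track=rewrite | github.com/laszlofrancziszti/feladat-01 | concerttickets.py | jegyeladas
-- ===== SOURCE A (Python) =====
-- import bisect
--
-- def jegyeladas(n, m, jegyarak, maximum_arak):
--     # Rendezés növekvő sorrendben
--     jegyarak.sort()
--     eredmenyek = []
--
--     for max_ar in maximum_arak:
--         # Keresés bináris kereséssel
--         index = bisect.bisect_right(jegyarak, max_ar) - 1
--
--         if index >= 0 and jegyarak[index] <= max_ar:
--             eredmenyek.append(jegyarak[index])
--             # Jegy eltávolítása
--             jegyarak.pop(index)
--         else:
--             eredmenyek.append(-1)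
--
--     return eredmenyek
-- ===== SOURCE B (Python) =====
-- def jegyeladas(n, m, jegyarak, maximum_arak):
--     # Alternative strategy: no sorting, no binary search. Keep the pool of
--     # unsold tickets as-is; for each customer pick the maximum affordable
--     # ticket directly from the pool and remove that one occurrence.
--     avail = list(jegyarak)
--     eredmenyek = []
--     for max_ar in maximum_arak:
--         cands = [p for p in avail if p <= max_ar]
--         if cands:
--             best = max(cands)
--             avail.remove(best)
--             eredmenyek.append(best)
--         else:
--             eredmenyek.append(-1)
--     return eredmenyek
-- ===== Notes on version B (the rewrite author's own statement) =====
-- stated objective: alternative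
-- what changed: Replaces A's sort + binary search + positional pop over a mutated sorted list with a direct per-customer scan: filter the unsold pool for affordable tickets, take their maximum, and remove that one occurrence (no sorting, no bisect, no index arithmetic); return-value equivalence only, since A sorts and pops the caller's jegyarak list in place while B leaves it untouched.
import Mathlib
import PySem

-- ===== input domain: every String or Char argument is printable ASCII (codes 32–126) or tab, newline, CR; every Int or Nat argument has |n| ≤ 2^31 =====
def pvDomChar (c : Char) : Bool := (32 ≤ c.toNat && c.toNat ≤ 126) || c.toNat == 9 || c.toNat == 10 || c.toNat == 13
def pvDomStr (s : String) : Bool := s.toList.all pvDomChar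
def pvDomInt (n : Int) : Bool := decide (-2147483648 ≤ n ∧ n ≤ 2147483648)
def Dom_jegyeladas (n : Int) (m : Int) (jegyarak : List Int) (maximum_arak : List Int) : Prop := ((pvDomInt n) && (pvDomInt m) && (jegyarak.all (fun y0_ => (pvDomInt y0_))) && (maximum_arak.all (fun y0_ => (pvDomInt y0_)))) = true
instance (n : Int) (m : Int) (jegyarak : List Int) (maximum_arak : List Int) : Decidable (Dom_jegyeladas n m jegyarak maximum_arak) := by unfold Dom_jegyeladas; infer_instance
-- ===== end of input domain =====

-- B replaces A's sort + bisect + positional pop with a direct filter/max/remove scan per customer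
-- (objective: alternative). Equivalence is about the RETURN value only: Python A sorts and pops the
-- caller's jegyarak list in place, B leaves its arguments untouched.

-- ===== PORT A =====
-- Loop body of A: index = bisect_right(tickets, x) - 1; if valid and affordable, emit that ticket
-- and pop it, else emit -1.  The guard guarantees 0 ≤ index < len, so getD/eraseIdx at index.toNat
-- are exactly Python's tickets[index] / tickets.pop(index) (PySem.List.pop?_natCast).
def jegyeladasLoop (tickets : List Int) (maxs : List Int) : List Int :=
  match maxs with
  | [] => []
  | x :: rest =>
    let index : Int := (PySem.List.bisectRight tickets x : Int) - 1
    if 0 ≤ index ∧ tickets.getD index.toNat 0 ≤ x then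
      tickets.getD index.toNat 0 :: jegyeladasLoop (tickets.eraseIdx index.toNat) rest
    else
      (-1) :: jegyeladasLoop tickets rest

def jegyeladas (n : Int) (m : Int) (jegyarak : List Int) (maximum_arak : List Int) : List Int :=
  jegyeladasLoop (PySem.List.sorted jegyarak (fun x => x)) maximum_arak

-- ===== PORT B =====
-- Loop body of B: cands = [p for p in avail if p <= x]; if cands: best = max(cands);
-- avail.remove(best) (= List.erase, first occurrence, PySem.List.remove?_eq_some_erase).
def jegyeladasAltLoop (avail : List Int) (maxs : List Int) : List Int :=
  match maxs with
  | [] => []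
  | x :: rest =>
    let cands := avail.filter (fun p => decide (p ≤ x))
    match PySem.List.max? cands (fun y => y) with
    | some best => best :: jegyeladasAltLoop (avail.erase best) rest
    | none => (-1) :: jegyeladasAltLoop avail rest

def jegyeladas_alt (n : Int) (m : Int) (jegyarak : List Int) (maximum_arak : List Int) : List Int :=
  jegyeladasAltLoop jegyarak maximum_arak

-- ===== PRECONDITION & SPEC =====
def Spec_jegyeladas (n : Int) (m : Int) (jegyarak : List Int) (maximum_arak : List Int) (out : List Int) : Prop := out = jegyeladas_alt n m jegyarak maximum_arak
instance (n : Int) (m : Int) (jegyarak : List Int) (maximum_arak : List Int) (out : List Int) : Decidable (Spec_jegyeladas n m jegyarak maximum_arak out) := by unfold Spec_jegyeladas; infer_instance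

-- ===== CLAIM (what is proved, stated in full; the proofs are below) =====
def Claim_equal_jegyeladas : Prop := ∀ (n : Int) (m : Int) (jegyarak : List Int) (maximum_arak : List Int), Dom_jegyeladas n m jegyarak maximum_arak → Spec_jegyeladas n m jegyarak maximum_arak (jegyeladas n m jegyarak maximum_arak)

-- ===== LEMMAS AND PROOFS =====

-- In a sorted list, the element just before the bisect_right insertion point is the maximum
-- element ≤ x (when the insertion point is positive).
theorem loops_agree (maxs : List Int) :
    ∀ (s t : List Int), s.Pairwise (· ≤ ·) → s.Perm t →
      jegyeladasLoop s maxs = jegyeladasAltLoop t maxs := by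
  induction maxs with
  | nil => intro s t _ _; rfl
  | cons x rest ih =>
    intro s t hsort hperm
    obtain ⟨hle, hlt_c, hc_lt⟩ := PySem.List.bisectRight_spec s x hsort
    simp only [jegyeladasLoop, jegyeladasAltLoop]
    by_cases h0 : PySem.List.bisectRight s x = 0
    · -- no ticket ≤ x : A's guard fails, B's candidate list is empty
      have hguard : ¬ (0 ≤ ((PySem.List.bisectRight s x : Int)) - 1 ∧
          s.getD (((PySem.List.bisectRight s x : Int)) - 1).toNat 0 ≤ x) := by
        rw [h0]; intro ⟨h1, _⟩; omega
      have hfilt : t.filter (fun p => decide (p ≤ x)) = [] := by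
        rw [List.filter_eq_nil_iff]
        intro p hp
        have hps : p ∈ s := hperm.mem_iff.mpr hp
        obtain ⟨j, hj, rfl⟩ := List.getElem_of_mem hps
        have := hc_lt j hj (by omega)
        simp; omega
      rw [if_neg hguard, hfilt]
      simp only [PySem.List.max?]
      exact congrArg _ (ih s t hsort hperm)
    · -- there is a ticket ≤ x; both pick the same value s[k] = max affordable, k = bisect-1
      obtain ⟨k, hck⟩ : ∃ k, PySem.List.bisectRight s x = k + 1 :=
        ⟨PySem.List.bisectRight s x - 1, by omega⟩
      have hk : k < s.length := by omega
      have hsk_le : s[k] ≤ x := hlt_c k hk (by omega)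
      have hIdx : (((PySem.List.bisectRight s x : Nat) : Int) - 1).toNat = k := by
        rw [hck]; omega
      have hguard : 0 ≤ ((PySem.List.bisectRight s x : Int)) - 1 ∧
          s.getD (((PySem.List.bisectRight s x : Int)) - 1).toNat 0 ≤ x := by
        refine ⟨by omega, ?_⟩
        rw [hIdx, List.getD_eq_getElem s 0 hk]; exact hsk_le
      have hmem_t : s[k] ∈ t := hperm.mem_iff.mp (s.getElem_mem hk)
      have hmem_c : s[k] ∈ t.filter (fun p => decide (p ≤ x)) := by
        rw [List.mem_filter]; exact ⟨hmem_t, by simpa using hsk_le⟩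
      -- max? of the candidate list is s[k]
      obtain ⟨best, hbest⟩ : ∃ b, PySem.List.max? (t.filter (fun p => decide (p ≤ x))) (fun y => y) = some b := by
        cases hmx : PySem.List.max? (t.filter (fun p => decide (p ≤ x))) (fun y => y) with
        | none => rw [PySem.List.max?_eq_none_iff] at hmx; rw [hmx] at hmem_c; cases hmem_c
        | some b => exact ⟨b, rfl⟩
      have hbest_mem : best ∈ t.filter (fun p => decide (p ≤ x)) := PySem.List.max?_mem hbest
      have hbest_ge : s[k] ≤ best := PySem.List.max?_isMax hbest _ hmem_c
      have hbest_le : best ≤ s[k] := by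
        rw [List.mem_filter] at hbest_mem
        obtain ⟨hbt, hbx⟩ := hbest_mem
        have hbs : best ∈ s := hperm.mem_iff.mpr hbt
        obtain ⟨j, hj, hbj⟩ := List.getElem_of_mem hbs
        subst hbj
        have hjk : j ≤ k := by
          by_contra hgt
          have := hc_lt j hj (by omega)
          simp at hbx; omega
        rcases Nat.lt_or_ge j k with hlt | hge
        · exact (List.pairwise_iff_getElem.mp hsort) j k hj hk hlt
        · have hje : j = k := by omega
          subst hje; exact le_rfl
      have hbeq : best = s[k] := le_antisymm hbest_le hbest_ge
      rw [if_pos hguard, hbest, hIdx, List.getD_eq_getElem s 0 hk, hbeq]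
      exact congrArg _ (ih _ _ (hsort.sublist (s.eraseIdx_sublist k))
        ((List.erase_getElem hk).symm.trans (hperm.erase s[k])))

theorem jegyeladas_spec : Claim_equal_jegyeladas := by
  intro n m jegyarak maximum_arak _
  unfold Spec_jegyeladas jegyeladas jegyeladas_alt
  exact loops_agree maximum_arak _ _
    (by simpa using PySem.List.sorted_pairwise jegyarak (fun x => x))
    (PySem.List.sorted_perm jegyarak (fun x => x) false)
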